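-- pv_equiv track=rewrite | github.com/kibrq/k-server-bench | k-servers/src/kserverclean/context/common.py | all_multicombinations
-- ===== SOURCE A (Python) =====
-- def all_multicombinations(n: int, k: int) -> list[tuple[int, ...]]:
--     """Generate nondecreasing length-k tuples over [0, n)."""
--     if k < 0:
--         raise ValueError("k must be non-negative")
--
--     res: list[tuple[int, ...]] = []
--     a = [0] * k
--
--     def go(i: int, start: int) -> None:
--         if i == k:
--             res.append(tuple(a))
--             return
--         for v in range(start, n):
--             a[i] = v
--             go(i + 1, v)
--
--     go(0, 0)
--     return res
-- ===== SOURCE B (Python) =====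
-- import itertools
--
-- def all_multicombinations(n: int, k: int) -> list[tuple[int, ...]]:
--     """Generate nondecreasing length-k tuples over [0, n)."""
--     if k < 0:
--         raise ValueError("k must be non-negative")
--     return list(itertools.combinations_with_replacement(range(n), k))
-- ===== Notes on version B (the rewrite author's own statement) =====
-- stated objective: idiomatic
-- what changed: Replaces the hand-written recursive backtracking over a shared mutable buffer with the standard library's itertools.combinations_with_replacement iterator, which yields the same nondecreasing tuples in the same lexicographic order.
import Mathlib
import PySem

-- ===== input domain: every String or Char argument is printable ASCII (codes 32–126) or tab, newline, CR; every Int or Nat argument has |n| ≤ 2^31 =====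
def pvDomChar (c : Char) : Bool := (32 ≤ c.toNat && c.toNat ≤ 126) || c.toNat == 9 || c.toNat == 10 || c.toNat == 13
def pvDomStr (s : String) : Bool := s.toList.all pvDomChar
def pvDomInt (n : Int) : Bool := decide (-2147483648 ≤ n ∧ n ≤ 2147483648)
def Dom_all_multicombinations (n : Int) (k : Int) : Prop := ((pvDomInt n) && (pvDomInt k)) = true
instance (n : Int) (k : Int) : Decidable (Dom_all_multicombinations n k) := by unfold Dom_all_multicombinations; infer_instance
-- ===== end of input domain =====

-- B replaces A's recursive backtracking over a shared buffer with the standard-library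
-- multicombination iterator (ported as structural recursion on the candidate list); same output.

-- ===== PORT A =====
-- A's helper go(i, start): builds res by recursing with the filled prefix of the buffer `a`
-- (modelled as the prefix list `a`; the tuple is appended when the remaining count hits 0).
def goA (n : Int) : Nat → List Int → Int → List (List Int)
  | 0, a, _ => [a]
  | rem + 1, a, start =>
      (PySem.List.pyRange start n 1).flatMap (fun v => goA n rem (a ++ [v]) v)

-- 'if k < 0: raise ValueError' → excluded by Pre_ (k ≥ 0); then go(0, 0).
def all_multicombinations (n : Int) (k : Int) : List (List Int) :=
  goA n k.toNat [] 0

-- ===== PORT B =====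
-- itertools.combinations_with_replacement(xs, k) on a list, in its lexicographic order.
def cwr : List Int → Nat → List (List Int)
  | _, 0 => [[]]
  | [], _ + 1 => []
  | x :: rest, kk + 1 =>
      (cwr (x :: rest) kk).map (fun t => x :: t) ++ cwr rest (kk + 1)
termination_by xs kk => (kk, xs.length)

def all_multicombinations_alt (n : Int) (k : Int) : List (List Int) :=
  cwr (PySem.List.pyRange 0 n 1) k.toNat

-- ===== PRECONDITION & SPEC =====
-- Pre_ excludes exactly k < 0, where A raises ValueError (and B raises the same).
def Pre_all_multicombinations (n : Int) (k : Int) : Prop := 0 ≤ k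
instance (n : Int) (k : Int) : Decidable (Pre_all_multicombinations n k) := by
  unfold Pre_all_multicombinations; infer_instance
def pvWitness_all_multicombinations : Int × Int := (3, 2)

def Spec_all_multicombinations (n : Int) (k : Int) (out : List (List Int)) : Prop := out = all_multicombinations_alt n k
instance (n : Int) (k : Int) (out : List (List Int)) : Decidable (Spec_all_multicombinations n k out) := by unfold Spec_all_multicombinations; infer_instance

-- ===== CLAIM (what is proved, stated in full; the proofs are below) =====
def Claim_equal_all_multicombinations : Prop := ∀ (n : Int) (k : Int), Dom_all_multicombinations n k → Pre_all_multicombinations n k → Spec_all_multicombinations n k (all_multicombinations n k)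

-- ===== LEMMAS AND PROOFS =====

-- key invariant: A's backtracking from prefix `a` at lower bound `start` enumerates exactly
-- the cwr-multicombinations of range(start, n), each prefixed with `a`, in the same order.
theorem goA_eq_cwr (n : Int) : ∀ (rem : Nat) (a : List Int) (start : Int),
    goA n rem a start = (cwr (PySem.List.pyRange start n 1) rem).map (fun t => a ++ t) := by
  intro rem
  induction rem with
  | zero => intro a start; simp [goA, cwr]
  | succ rem ih =>
    intro a start
    -- inner induction on the length of range(start, n)
    have H : ∀ (m : Nat) (a : List Int) (start : Int), (n - start).toNat = m →
        goA n (rem + 1) a start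
          = (cwr (PySem.List.pyRange start n 1) (rem + 1)).map (fun t => a ++ t) := by
      intro m
      induction m with
      | zero =>
        intro a start hm
        have hns : ¬ start < n := by omega
        have hr : PySem.List.pyRange start n 1 = [] := by
          have := PySem.List.length_pyRange_one start n
          cases h : PySem.List.pyRange start n 1 with
          | nil => rfl
          | cons x xs => rw [h] at this; simp at this; omega
        simp [goA, cwr, hr]
      | succ m ihm =>
        intro a start hm
        have hlt : start < n := by omega
        have hr : PySem.List.pyRange start n 1 = start :: PySem.List.pyRange (start + 1) n 1 :=
          PySem.List.pyRange_one_cons hlt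
        have h1 : goA n rem (a ++ [start]) start
            = (cwr (PySem.List.pyRange start n 1) rem).map (fun t => (a ++ [start]) ++ t) :=
          ih (a ++ [start]) start
        have h2 : goA n (rem + 1) a (start + 1)
            = (cwr (PySem.List.pyRange (start + 1) n 1) (rem + 1)).map (fun t => a ++ t) :=
          ihm a (start + 1) (by omega)
        calc goA n (rem + 1) a start
            = (PySem.List.pyRange start n 1).flatMap (fun v => goA n rem (a ++ [v]) v) := rfl
          _ = goA n rem (a ++ [start]) start
                ++ (PySem.List.pyRange (start + 1) n 1).flatMap
                    (fun v => goA n rem (a ++ [v]) v) := by rw [hr]; simp [List.flatMap]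
          _ = (cwr (PySem.List.pyRange start n 1) rem).map (fun t => (a ++ [start]) ++ t)
                ++ (cwr (PySem.List.pyRange (start + 1) n 1) (rem + 1)).map (fun t => a ++ t) := by
                rw [h1]
                have : (PySem.List.pyRange (start + 1) n 1).flatMap
                    (fun v => goA n rem (a ++ [v]) v)
                    = goA n (rem + 1) a (start + 1) := rfl
                rw [this, h2]
          _ = (cwr (PySem.List.pyRange start n 1) (rem + 1)).map (fun t => a ++ t) := by
                rw [hr, cwr]
                simp [List.map_map, Function.comp]
    exact H (n - start).toNat a start rfl

-- ===== VERDICT (by name: the statement is the Claim_ definition above) =====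
theorem all_multicombinations_spec : Claim_equal_all_multicombinations := by
  intro n k _ _
  unfold Spec_all_multicombinations all_multicombinations all_multicombinations_alt
  rw [goA_eq_cwr]
  simp
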